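-- pv_equiv track=rewrite | github.com/posl/comment_recommendation | script/mod_gen/5_time/en/278_B/6.py | confusing_time
-- ===== SOURCE A (Python) =====
-- def confusing_time(h,m):
--     while True:
--         m += 1
--         if m == 60:
--             h += 1
--             m = 0
--             if h == 24:
--                 h = 0
--         if h // 10 == m % 10 and h % 10 == m // 10:
--             return h, m
-- ===== SOURCE B (Python) =====
-- def confusing_time(h, m):
--     # The only minute that mirrors hour h is rev(h); iterate hours, not minutes.
--     r = (h % 10) * 10 + h // 10
--     if r < 60 and r > m:
--         return h, r
--     for t in range(1, 25):
--         hh = (h + t) % 24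
--         r = (hh % 10) * 10 + hh // 10
--         if r < 60:
--             return hh, r
-- ===== Notes on version B (the rewrite author's own statement) =====
-- stated objective: alternative
-- what changed: B derives the unique mirror minute rev(h)=(h%10)*10+h//10 arithmetically and iterates over at most 24 hours instead of A's minute-by-minute scan of the whole day; Pre_ restricts to the function's natural domain (valid clock hours, plus hours 24..99 whose mirror minute still lies ahead in the current hour), outside which A's scan diverges or returns non-clock values that are artefacts of the scan.
-- outside the precondition, e.g. on confusing_time(25, 55): A returns (30, 3), B returns (2, 20); on confusing_time(29, 60): A returns (29, 92), B returns (10, 1); on confusing_time(100, 0): A does not finish within the time limit, B returns (100, 10)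
import Mathlib
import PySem

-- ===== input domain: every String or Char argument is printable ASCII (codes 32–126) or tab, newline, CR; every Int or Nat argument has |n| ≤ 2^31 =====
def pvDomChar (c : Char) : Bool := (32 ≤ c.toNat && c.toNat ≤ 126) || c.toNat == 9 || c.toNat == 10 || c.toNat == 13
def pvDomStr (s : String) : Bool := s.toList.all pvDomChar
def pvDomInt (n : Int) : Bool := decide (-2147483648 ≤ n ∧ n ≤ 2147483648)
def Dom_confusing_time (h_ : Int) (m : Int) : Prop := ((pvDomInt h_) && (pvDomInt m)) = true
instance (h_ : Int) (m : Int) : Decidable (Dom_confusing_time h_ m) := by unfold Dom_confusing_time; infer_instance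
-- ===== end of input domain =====

-- B derives the mirror minute rev(h)=(h%10)*10+h//10 arithmetically and loops over at most
-- 24 hours instead of A's minute-by-minute scan; equal to A on Pre_ (see Pre_ comment).


-- ===== PORT A =====
-- body of A's `while True` loop: m += 1; if m == 60: h += 1; m = 0; if h == 24: h = 0
def ctA_body (h m : Int) : Int × Int :=
  let m := m + 1
  if m = 60 then
    let h := h + 1
    if h = 24 then ((0 : Int), (0 : Int)) else (h, (0 : Int))
  else (h, m)

-- A's return test: h // 10 == m % 10 and h % 10 == m // 10
def ctA_fire (h m : Int) : Bool :=
  decide (PySem.Int.floordiv h 10 = PySem.Int.mod m 10 ∧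
          PySem.Int.mod h 10 = PySem.Int.floordiv m 10)

-- the `while True` scan, made total with fuel 2^32 (never exhausted on Pre_-admitted inputs)
def ctA_loop : Nat → Int → Int → Int × Int
  | 0, h, m => (h, m)
  | f + 1, h, m =>
    let s := ctA_body h m
    if ctA_fire s.1 s.2 then s else ctA_loop f s.1 s.2

def confusing_time (h_ : Int) (m : Int) : Int × Int := ctA_loop 4294967296 h_ m

-- ===== PORT B =====
-- the `for t in range(1, 25)` loop with early return
def ctB_scan (h : Int) : List Int → Option (Int × Int)
  | [] => none
  | t :: ts =>
    let hh := PySem.Int.mod (h + t) 24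
    let r := (PySem.Int.mod hh 10) * 10 + PySem.Int.floordiv hh 10
    if r < 60 then some (hh, r) else ctB_scan h ts

def confusing_time_alt (h_ : Int) (m : Int) : Int × Int :=
  let r := (PySem.Int.mod h_ 10) * 10 + PySem.Int.floordiv h_ 10
  if r < 60 ∧ r > m then (h_, r)
  else (ctB_scan h_ (PySem.List.pyRange 1 25 1)).getD (0, 0)  -- the loop always returns; default unreached

-- ===== PRECONDITION & SPEC =====
-- Pre_ is the function's natural domain — valid clock times (with any current minute m < 60,
-- negative m behaving like m = -1) — plus the out-of-range hours 24..99 whose mirror minute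
-- still lies ahead in the current hour; outside Pre_ A's minute scan diverges (e.g. h = 100)
-- or returns non-clock values that are artefacts of the scan (see cites).
def Pre_confusing_time (h_ : Int) (m : Int) : Prop :=
  (0 ≤ h_ ∧ h_ ≤ 23 ∧ m < 60) ∨
  (24 ≤ h_ ∧ h_ ≤ 99 ∧ h_ % 10 * 10 + h_ / 10 < 60 ∧ m < h_ % 10 * 10 + h_ / 10)
instance (h_ : Int) (m : Int) : Decidable (Pre_confusing_time h_ m) := by
  unfold Pre_confusing_time; infer_instance
def pvWitness_confusing_time : Int × Int := (7, 15)

def Spec_confusing_time (h_ : Int) (m : Int) (out : Int × Int) : Prop := out = confusing_time_alt h_ m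
instance (h_ : Int) (m : Int) (out : Int × Int) : Decidable (Spec_confusing_time h_ m out) := by unfold Spec_confusing_time; infer_instance

-- ===== CLAIM (what is proved, stated in full; the proofs are below) =====
def Claim_equal_confusing_time : Prop := ∀ (h_ : Int) (m : Int), Dom_confusing_time h_ m → Pre_confusing_time h_ m → Spec_confusing_time h_ m (confusing_time h_ m)

-- ===== LEMMAS AND PROOFS =====

-- proof-only mirror of ctA_loop: does the scan return within f steps?
def ctFires : Nat → Int → Int → Bool
  | 0, _, _ => false
  | f + 1, h, m =>
    let s := ctA_body h m
    if ctA_fire s.1 s.2 then true else ctFires f s.1 s.2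

-- once the scan returns within f steps, extra fuel does not change the result
lemma ctA_loop_stable : ∀ (f : Nat) (h m : Int) (k : Nat),
    ctFires f h m = true → ctA_loop (f + k) h m = ctA_loop f h m := by
  intro f
  induction f with
  | zero => intro h m k hf; simp [ctFires] at hf
  | succ f ih =>
    intro h m k hf
    have : f + 1 + k = (f + k) + 1 := by omega
    rw [this]
    simp only [ctA_loop]
    simp only [ctFires] at hf
    by_cases hfire : ctA_fire (ctA_body h m).1 (ctA_body h m).2 = true
    · simp [hfire]
    · simp only [Bool.not_eq_true] at hfire
      simp only [hfire, Bool.false_eq_true, if_false] at hf ⊢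
      exact ih _ _ k hf

-- while m ≤ -2 a step of A only increments m (no wrap, and the mirror test cannot fire)
lemma ctA_loop_skip (f : Nat) (h m : Int) (hm : m ≤ -2) :
    ctA_loop (f + 1) h m = ctA_loop f h (m + 1) := by
  have hb : ctA_body h m = (h, m + 1) := by
    unfold ctA_body
    simp only []
    rw [if_neg (by omega)]
  have hfire : ctA_fire h (m + 1) = false := by
    unfold ctA_fire
    simp only [decide_eq_false_iff_not]
    rintro ⟨-, h2⟩
    simp only [PySem.Int.mod_eq_emod_of_pos (show (0:Int) < 10 by norm_num),
        PySem.Int.floordiv_eq_ediv_of_pos (show (0:Int) < 10 by norm_num)] at h2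
    omega
  simp only [ctA_loop, hb, hfire, Bool.false_eq_true, if_false]

-- iterating the skip step: starting at m = -1 - n is the same as starting at m = -1
lemma ctA_loop_skip_many : ∀ (n f : Nat) (h : Int),
    ctA_loop (n + f) h (-1 - (n : Int)) = ctA_loop f h (-1) := by
  intro n
  induction n with
  | zero => intro f h; norm_num
  | succ n ih =>
    intro f h
    have h1 : n + 1 + f = (n + f) + 1 := by omega
    have h2 : (-1 - ((n : Int) + 1)) + 1 = -1 - (n : Int) := by ring
    rw [h1, ctA_loop_skip _ _ _ (by push_cast; omega)]
    push_cast
    rw [h2]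
    exact ih f h

-- B ignores the exact value of a negative m (its mirror minute r is ≥ 0)
lemma B_neg (h m : Int) (h0 : 0 ≤ h) (hm : m ≤ -1) :
    confusing_time_alt h m = confusing_time_alt h (-1) := by
  unfold confusing_time_alt
  have hr : 0 ≤ PySem.Int.mod h 10 * 10 + PySem.Int.floordiv h 10 := by
    simp only [PySem.Int.mod_eq_emod_of_pos (show (0:Int) < 10 by norm_num),
        PySem.Int.floordiv_eq_ediv_of_pos (show (0:Int) < 10 by norm_num)]
    omega
  simp only []
  split_ifs with c1 c2 c2 <;> first | rfl | (exfalso; omega)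

-- finite base: A = B for all h ∈ [0,99], m ∈ [-1,59] admitted by Pre_
set_option maxRecDepth 100000 in
set_option maxHeartbeats 4000000 in
lemma ct_base : ∀ a ∈ List.range 100, ∀ b ∈ List.range 61,
    Pre_confusing_time (a : Int) ((b : Int) - 1) →
    confusing_time (a : Int) ((b : Int) - 1) = confusing_time_alt (a : Int) ((b : Int) - 1) := by
  decide

-- finite base: from m = -1 the scan fires within 1441 steps on every Pre_-admitted hour
set_option maxRecDepth 100000 in
set_option maxHeartbeats 4000000 in
lemma ct_fires_base : ∀ a ∈ List.range 100,
    Pre_confusing_time (a : Int) (-1) → ctFires 1441 (a : Int) (-1) = true := by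
  decide

-- ===== VERDICT (by name: the statement is the Claim_ definition above) =====
theorem confusing_time_spec : Claim_equal_confusing_time := by
  intro h_ m hdom hpre
  have hdm : -2147483648 ≤ m := by
    unfold Dom_confusing_time pvDomInt at hdom
    simp only [Bool.and_eq_true, decide_eq_true_eq] at hdom
    exact hdom.2.1
  have hh0 : 0 ≤ h_ ∧ h_ ≤ 99 := by
    rcases hpre with ⟨a, b, -⟩ | ⟨a, b, -⟩ <;> constructor <;> omega
  have hpre1 : Pre_confusing_time h_ (-1) := by
    rcases hpre with ⟨a, b, -⟩ | ⟨a, b, c, -⟩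
    · exact Or.inl ⟨a, b, by omega⟩
    · exact Or.inr ⟨a, b, c, by omega⟩
  by_cases hneg : -1 ≤ m
  · -- m ∈ [-1, 59]: directly in the finite base
    have hm60 : m < 60 := by rcases hpre with ⟨-, -, c⟩ | ⟨-, -, c, d⟩ <;> omega
    have e1 : h_ = ((h_.toNat : Int)) := by omega
    have e2 : m = (((m + 1).toNat : Int)) - 1 := by omega
    have := ct_base h_.toNat (by simp [List.mem_range]; omega)
      (m + 1).toNat (by simp [List.mem_range]; omega)
    rw [e1, e2]
    exact this (by rw [← e1, ← e2]; exact hpre)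
  · -- m ≤ -2: peel the skip steps down to m = -1, then use the finite base
    push Not at hneg
    set n : Nat := (-1 - m).toNat with hn
    have hmn : m = -1 - (n : Int) := by omega
    have hnle : n ≤ 2147483647 := by omega
    show confusing_time h_ m = confusing_time_alt h_ m
    have hfires := ct_fires_base h_.toNat (by simp [List.mem_range]; omega)
      (by rw [show ((h_.toNat : Int)) = h_ by omega]; exact hpre1)
    rw [show ((h_.toNat : Int)) = h_ by omega] at hfires
    have split1 : (4294967296 : Nat) = n + (4294967296 - n) := by omega
    have split2 : (4294967296 - n : Nat) = 1441 + (4294967296 - n - 1441) := by omega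
    calc confusing_time h_ m
        = ctA_loop 4294967296 h_ (-1 - (n : Int)) := by rw [← hmn]; rfl
      _ = ctA_loop (4294967296 - n) h_ (-1) := by
            have hs := ctA_loop_skip_many n (4294967296 - n) h_
            rw [← split1] at hs
            exact hs
      _ = ctA_loop 1441 h_ (-1) := by
            rw [split2]; exact ctA_loop_stable 1441 h_ (-1) _ hfires
      _ = ctA_loop 4294967296 h_ (-1) := by
            rw [show (4294967296 : Nat) = 1441 + (4294967296 - 1441) by omega]
            exact (ctA_loop_stable 1441 h_ (-1) _ hfires).symm
      _ = confusing_time_alt h_ (-1) := by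
            have e1 : h_ = ((h_.toNat : Int)) := by omega
            have := ct_base h_.toNat (by simp [List.mem_range]; omega) 0 (by simp)
            simp only [Nat.cast_zero, zero_sub] at this
            rw [e1]
            exact this (by rw [← e1]; exact hpre1)
      _ = confusing_time_alt h_ m := (B_neg h_ m (by omega) (by omega)).symm
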